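-- pv_equiv track=rewrite | github.com/beeetfarmer/Shufflefin | backend/utils/filters.py | filter_by_cast
-- ===== SOURCE A (Python) =====
-- def filter_by_cast(items, cast_members):
--     """Filter items by cast members (all must match)."""
--     if not cast_members:
--         return items
--
--     filtered_items = []
--     for item in items:
--         cast_list = [
--             person.get("Name")
--             for person in item.get("People", [])
--             if person.get("Type") == "Actor"
--         ]
--         if all(cast_member in cast_list for cast_member in cast_members):
--             filtered_items.append(item)
--     return filtered_items
-- ===== SOURCE B (Python) =====
-- def filter_by_cast(items, cast_members):
--     """Filter items by cast members (all must match)."""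
--     if not cast_members:
--         return items
--
--     # one pass: actor name -> set of indices of items containing that actor
--     index = {}
--     for i, item in enumerate(items):
--         for person in item.get("People", []):
--             if person.get("Type") == "Actor":
--                 index.setdefault(person.get("Name"), set()).add(i)
--
--     common = index.get(cast_members[0], set())
--     for cm in cast_members[1:]:
--         common = common & index.get(cm, set())
--
--     return [item for i, item in enumerate(items) if i in common]
-- ===== Notes on version B (the rewrite author's own statement) =====
-- stated objective: alternative
-- what changed: Instead of rebuilding the per-item actor list and scanning it for every cast member, B builds an inverted index (actor name -> set of item indices) in one pass, intersects the index sets of the cast members, and keeps the items whose index is in the intersection.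
import Mathlib
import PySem

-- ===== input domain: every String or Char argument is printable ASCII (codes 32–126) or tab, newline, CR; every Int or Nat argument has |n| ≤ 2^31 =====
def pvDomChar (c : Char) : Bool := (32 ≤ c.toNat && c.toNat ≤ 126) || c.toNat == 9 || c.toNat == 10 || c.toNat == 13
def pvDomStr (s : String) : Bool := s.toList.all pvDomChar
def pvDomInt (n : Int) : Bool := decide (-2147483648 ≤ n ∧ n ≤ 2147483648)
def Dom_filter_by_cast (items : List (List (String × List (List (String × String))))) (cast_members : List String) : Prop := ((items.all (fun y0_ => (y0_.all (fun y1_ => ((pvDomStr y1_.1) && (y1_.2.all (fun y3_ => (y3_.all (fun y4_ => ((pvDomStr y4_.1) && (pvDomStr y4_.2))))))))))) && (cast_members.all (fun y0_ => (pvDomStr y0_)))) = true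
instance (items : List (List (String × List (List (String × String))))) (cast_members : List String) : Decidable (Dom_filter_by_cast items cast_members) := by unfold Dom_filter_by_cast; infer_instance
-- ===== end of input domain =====

-- B replaces A's per-item cast-list rebuild and rescans by an inverted index (actor name -> set of item indices)
-- intersected over the cast members; objective: alternative algorithm (not measured faster).

-- shared accessors (the Python `x.get(...)` expressions both programs use)
def pvPeople (item : List (String × List (List (String × String)))) : List (List (String × String)) :=
  (PySem.Dict.mk item).getD "People" []
def pvIsActor (p : List (String × String)) : Bool :=
  (PySem.Dict.mk p).get? "Type" == some "Actor"
def pvName (p : List (String × String)) : Option String :=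
  (PySem.Dict.mk p).get? "Name"

-- ===== PORT A =====
def filter_by_cast (items : List (List (String × List (List (String × String))))) (cast_members : List String) : List (List (String × List (List (String × String)))) :=
  if cast_members.isEmpty then items
  else
    items.foldl (fun acc item =>
      let cast_list := ((pvPeople item).filter pvIsActor).map pvName
      if cast_members.all (fun cm => cast_list.contains (some cm)) then acc ++ [item] else acc) []

-- ===== PORT B =====
-- index = {}; for i, item in enumerate(items): for person in …: index.setdefault(name, set()).add(i)
def pvIndexB (items : List (List (String × List (List (String × String))))) : PySem.Dict (Option String) (PySem.Set Int) :=
  (PySem.List.enumerate items).foldl (fun d pi =>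
    (pvPeople pi.2).foldl (fun d p =>
      if pvIsActor p then d.modify (pvName p) PySem.Set.empty (fun s => PySem.Set.add s pi.1) else d) d)
    PySem.Dict.empty

def filter_by_cast_alt (items : List (List (String × List (List (String × String))))) (cast_members : List String) : List (List (String × List (List (String × String)))) :=
  match cast_members with
  | [] => items
  | cm0 :: rest =>
    let index := pvIndexB items
    let common := rest.foldl (fun s cm => PySem.Set.inter s (index.getD (some cm) PySem.Set.empty))
                    (index.getD (some cm0) PySem.Set.empty)
    (PySem.List.enumerate items).foldl (fun acc pi =>
      if PySem.Set.contains common pi.1 then acc ++ [pi.2] else acc) []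

-- ===== PRECONDITION & SPEC =====
def Spec_filter_by_cast (items : List (List (String × List (List (String × String))))) (cast_members : List String) (out : List (List (String × List (List (String × String))))) : Prop := out = filter_by_cast_alt items cast_members
instance (items : List (List (String × List (List (String × String))))) (cast_members : List String) (out : List (List (String × List (List (String × String))))) : Decidable (Spec_filter_by_cast items cast_members out) := by unfold Spec_filter_by_cast; infer_instance

-- ===== CLAIM (what is proved, stated in full; the proofs are below) =====
def Claim_equal_filter_by_cast : Prop := ∀ (items : List (List (String × List (List (String × String))))) (cast_members : List String), Dom_filter_by_cast items cast_members → Spec_filter_by_cast items cast_members (filter_by_cast items cast_members)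

-- ===== LEMMAS AND PROOFS =====

-- item has an Actor person whose Name is k
def pvHas (item : List (String × List (List (String × String)))) (k : Option String) : Bool :=
  (pvPeople item).any (fun p => pvIsActor p && pvName p == k)

-- A's membership test in the cast list is pvHas
theorem castList_contains (item : List (String × List (List (String × String)))) (k : Option String) :
    (((pvPeople item).filter pvIsActor).map pvName).contains k = pvHas item k := by
  simp only [pvHas]
  rw [Bool.eq_iff_iff, List.contains_iff_mem, List.any_eq_true]
  simp only [List.mem_map]
  constructor
  · rintro ⟨p, hp, rfl⟩
    rw [List.mem_filter] at hp
    exact ⟨p, hp.1, by simp [hp.2]⟩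
  · rintro ⟨p, hp, h⟩
    rw [Bool.and_eq_true, beq_iff_eq] at h
    exact ⟨p, List.mem_filter.mpr ⟨hp, h.1⟩, h.2⟩

-- inner per-item fold: effect on set membership
theorem inner_fold_mem (people : List (List (String × String)))
    (d : PySem.Dict (Option String) (PySem.Set Int)) (i j : Int) (k : Option String) :
    (j ∈ (people.foldl (fun d p =>
        if pvIsActor p then d.modify (pvName p) PySem.Set.empty (fun s => PySem.Set.add s i) else d) d).getD k PySem.Set.empty)
    ↔ (j ∈ d.getD k PySem.Set.empty ∨ (j = i ∧ people.any (fun p => pvIsActor p && pvName p == k) = true)) := by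
  induction people generalizing d with
  | nil => simp
  | cons p ps ih =>
    simp only [List.foldl_cons, List.any_cons]
    by_cases hp : pvIsActor p = true
    · rw [if_pos hp, ih]
      rw [PySem.Dict.getD_modify]
      by_cases hk : k = pvName p
      · subst hk
        simp [PySem.Set.mem_add, hp]
        tauto
      · simp [hk, hp, Ne.symm hk]
    · simp only [if_neg hp, ih]
      simp [hp]

-- outer fold over enumerate: membership of the built index
theorem outer_fold_mem (items : List (List (String × List (List (String × String)))))
    (s : Int) (d : PySem.Dict (Option String) (PySem.Set Int)) (j : Int) (k : Option String) :
    (j ∈ ((PySem.List.enumerate items s).foldl (fun d pi =>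
        (pvPeople pi.2).foldl (fun d p =>
          if pvIsActor p then d.modify (pvName p) PySem.Set.empty (fun s' => PySem.Set.add s' pi.1) else d) d) d).getD k PySem.Set.empty)
    ↔ (j ∈ d.getD k PySem.Set.empty ∨ ∃ (n : Nat) (h : n < items.length), j = s + n ∧ pvHas items[n] k = true) := by
  induction items generalizing s d with
  | nil => simp [PySem.List.enumerate_nil]
  | cons x xs ih =>
    rw [PySem.List.enumerate_cons, List.foldl_cons, ih, inner_fold_mem]
    constructor
    · rintro (((h | ⟨rfl, h⟩) | ⟨n, hn, rfl, h⟩))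
      · exact Or.inl h
      · exact Or.inr ⟨0, by simp, by simp, by simpa [pvHas] using h⟩
      · exact Or.inr ⟨n + 1, by simpa using hn, by push_cast; ring, by simpa using h⟩
    · rintro (h | ⟨n, hn, rfl, h⟩)
      · exact Or.inl (Or.inl h)
      · cases n with
        | zero => exact Or.inl (Or.inr ⟨by simp, by simpa [pvHas] using h⟩)
        | succ m =>
          refine Or.inr ⟨m, by simpa using hn, by push_cast; ring, by simpa using h⟩

theorem index_mem (items : List (List (String × List (List (String × String))))) (j : Int) (k : Option String) :
    (j ∈ (pvIndexB items).getD k PySem.Set.empty)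
    ↔ ∃ (n : Nat) (h : n < items.length), j = n ∧ pvHas items[n] k = true := by
  rw [pvIndexB, outer_fold_mem]
  simp

-- intersection fold
theorem inter_fold_mem (rest : List String) (index : PySem.Dict (Option String) (PySem.Set Int))
    (s : PySem.Set Int) (j : Int) :
    (j ∈ rest.foldl (fun s cm => PySem.Set.inter s (index.getD (some cm) PySem.Set.empty)) s)
    ↔ (j ∈ s ∧ ∀ cm ∈ rest, j ∈ index.getD (some cm) PySem.Set.empty) := by
  induction rest generalizing s with
  | nil => simp
  | cons c cs ih =>
    rw [List.foldl_cons, ih]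
    simp [PySem.Set.mem_inter]
    tauto

-- final loop: filter by index membership = filter by the per-item predicate
theorem final_fold (items : List (List (String × List (List (String × String)))))
    (common : PySem.Set Int) (s : Int) (acc : List (List (String × List (List (String × String)))))
    (P : List (String × List (List (String × String))) → Bool)
    (H : ∀ (n : Nat) (h : n < items.length), (PySem.Set.contains common (s + n) = P items[n])) :
    (PySem.List.enumerate items s).foldl (fun acc pi =>
      if PySem.Set.contains common pi.1 then acc ++ [pi.2] else acc) acc
    = acc ++ items.filter P := by
  induction items generalizing s acc with
  | nil => simp [PySem.List.enumerate_nil]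
  | cons x xs ih =>
    rw [PySem.List.enumerate_cons, List.foldl_cons]
    have h0 := H 0 (by simp)
    simp only [List.getElem_cons_zero, Nat.cast_zero, add_zero] at h0
    have hrec : ∀ (n : Nat) (h : n < xs.length), PySem.Set.contains common (s + 1 + n) = P xs[n] := by
      intro n hn
      have := H (n + 1) (by simpa using hn)
      simpa [add_assoc, add_comm, add_left_comm] using this
    have hmem : (s ∈ common) ↔ P x = true := by
      rw [← PySem.Set.contains_iff, h0]
    by_cases hx : P x = true
    · rw [if_pos (by simpa [hmem] using hx), ih (s + 1) _ hrec]
      simp [hx]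
    · rw [if_neg (by simpa [hmem] using hx), ih (s + 1) _ hrec]
      simp only [Bool.not_eq_true] at hx
      simp [hx]

-- ===== VERDICT (by name: the statement is the Claim_ definition above) =====
theorem filter_by_cast_spec : Claim_equal_filter_by_cast := by
  intro items cast_members _
  unfold Spec_filter_by_cast filter_by_cast filter_by_cast_alt
  cases cast_members with
  | nil => simp
  | cons cm0 rest =>
    simp only [List.isEmpty_cons, if_neg (by simp : ¬ (false = true))]
    rw [PySem.List.foldl_append_if (p := fun item => (cm0 :: rest).all (fun cm => (((pvPeople item).filter pvIsActor).map pvName).contains (some cm))) (f := fun x => x)]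
    rw [List.map_id', List.nil_append,
        List.filter_congr (q := fun item => decide (∀ cm ∈ cm0 :: rest, pvHas item (some cm) = true))
          (fun item _ => by
            rw [Bool.eq_iff_iff, List.all_eq_true, decide_eq_true_iff]
            simp only [castList_contains])]
    refine (final_fold items _ 0 []
      (fun item => decide (∀ cm ∈ cm0 :: rest, pvHas item (some cm) = true)) ?_).symm
    intro n hn
    have hidx : ∀ cm : String,
        ((n : Int) ∈ (pvIndexB items).getD (some cm) PySem.Set.empty ↔ pvHas items[n] (some cm) = true) := by
      intro cm
      rw [index_mem]
      constructor
      · rintro ⟨m, hm, hjm, h⟩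
        have : m = n := by exact_mod_cast hjm.symm
        subst this; exact h
      · intro h; exact ⟨n, hn, rfl, h⟩
    rw [Bool.eq_iff_iff, PySem.Set.contains_iff, zero_add, inter_fold_mem, hidx]
    simp only [decide_eq_true_iff, List.mem_cons]
    constructor
    · rintro ⟨h0, hr⟩ cm (rfl | hcm)
      · exact h0
      · exact (hidx cm).mp (hr cm hcm)
    · intro h
      exact ⟨h cm0 (Or.inl rfl), fun cm hcm => (hidx cm).mpr (h cm (Or.inr hcm))⟩
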